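-- pv_equiv track=rewrite | github.com/itsmesanju/pythonSkills | leetCode/slot_machine.py | slot_machine
-- ===== SOURCE A (Python) =====
-- def slot_machine(n, spins):
--     result = 0
--
--     while spins:
--         max_values = [max(row) for row in spins]
--         max_value = max(max_values)
--
--         result += max_value
--
--         for i in range(len(spins)):
--             if max_value in spins[i]:
--                 spins[i].remove(max_value)
--
--         spins = [row for row in spins if row]
--
--     return result
-- ===== SOURCE B (Python) =====
-- def slot_machine(n, spins):
--     # One pass: the answer is sum over distinct values v of v * (max count of v in any single row)
--     best = {}
--     for row in spins:
--         cnt = {}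
--         for v in row:
--             cnt[v] = cnt.get(v, 0) + 1
--         for v, c in cnt.items():
--             best[v] = max(best.get(v, 0), c)
--     return sum(v * c for v, c in best.items())
-- ===== Notes on version B (the rewrite author's own statement) =====
-- stated objective: faster
-- what changed: A repeatedly finds the global maximum and removes one occurrence of it from every row until all rows are empty; B makes a single counting pass and returns the sum over distinct values v of v times the maximum count of v in any single row.
import Mathlib
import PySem

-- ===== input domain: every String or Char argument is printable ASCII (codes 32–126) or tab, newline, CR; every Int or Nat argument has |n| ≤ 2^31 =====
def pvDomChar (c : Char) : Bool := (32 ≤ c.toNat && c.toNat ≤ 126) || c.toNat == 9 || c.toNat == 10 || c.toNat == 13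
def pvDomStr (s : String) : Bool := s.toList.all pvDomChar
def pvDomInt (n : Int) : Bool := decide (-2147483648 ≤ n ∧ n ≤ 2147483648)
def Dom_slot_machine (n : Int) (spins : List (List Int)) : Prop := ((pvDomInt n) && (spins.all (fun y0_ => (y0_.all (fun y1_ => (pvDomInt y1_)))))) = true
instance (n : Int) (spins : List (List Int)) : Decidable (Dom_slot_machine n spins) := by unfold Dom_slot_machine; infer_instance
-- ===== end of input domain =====

-- B replaces A's repeated global-max-and-remove rounds by a single counting pass (sum of v * max per-row count of v).
-- Python A mutates the input row lists in place; the equivalence proved here is about the return value only.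

-- ===== PORT A =====
-- max(xs); Python raises ValueError on [] (excluded by Pre_), the .getD 0 default is never reached there
def pymaxD (xs : List Int) : Int := (PySem.List.max? xs (fun y => y)).getD 0

-- the for-loop 'if max_value in spins[i]: spins[i].remove(max_value)' followed by the
-- comprehension '[row for row in spins if row]'
def stepRemove (m : Int) (spins : List (List Int)) : List (List Int) :=
  (spins.map (fun row => if m ∈ row then (PySem.List.remove? row m).getD row else row)).filter
    (fun row => !row.isEmpty)

def measureA (spins : List (List Int)) : Nat := (spins.map List.length).sum + spins.length

theorem pymaxD_mem_flatten (spins : List (List Int)) (hne : spins ≠ [])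
    (h : ∀ row ∈ spins, row ≠ []) : pymaxD (spins.map pymaxD) ∈ spins.flatten := by
  rcases hmax : PySem.List.max? (spins.map pymaxD) (fun y => y) with _ | m
  · rw [PySem.List.max?_eq_none_iff, List.map_eq_nil_iff] at hmax
    exact absurd hmax hne
  · have hm : m ∈ spins.map pymaxD := PySem.List.max?_mem hmax
    obtain ⟨row, hrow, hrm⟩ := List.mem_map.mp hm
    rcases hmax2 : PySem.List.max? row (fun y => y) with _ | m'
    · rw [PySem.List.max?_eq_none_iff] at hmax2
      exact absurd hmax2 (h row hrow)
    · have hm' : m' ∈ row := PySem.List.max?_mem hmax2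
      have : pymaxD (spins.map pymaxD) = m' := by
        rw [pymaxD, hmax, Option.getD_some, ← hrm, pymaxD, hmax2, Option.getD_some]
      rw [this]
      exact List.mem_flatten.mpr ⟨row, hrow, hm'⟩


-- termination of A's while-loop (cited by loopA's decreasing_by)
theorem step_measure_lt (spins : List (List Int)) (h : spins ≠ []) :
    measureA (stepRemove (pymaxD (spins.map pymaxD)) spins) < measureA spins := by
  have hg_le : ∀ row : List Int, ∀ M : Int,
      ((if M ∈ row then (PySem.List.remove? row M).getD row else row).length) ≤ row.length := by
    intro row M
    by_cases hM : M ∈ row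
    · rw [if_pos hM, PySem.List.remove?_eq_some_erase _ _ hM, Option.getD_some]
      exact (List.erase_sublist).length_le
    · rw [if_neg hM]
  set M := pymaxD (spins.map pymaxD) with hMdef
  set g := fun row : List Int => if M ∈ row then (PySem.List.remove? row M).getD row else row with hgdef
  have hsum_fil : (((spins.map g).filter (fun row => !row.isEmpty)).map List.length).sum
      ≤ ((spins.map g).map List.length).sum :=
    ((List.filter_sublist).map List.length).sum_le_sum (fun a _ => Nat.zero_le a)
  have hlen_fil : ((spins.map g).filter (fun row => !row.isEmpty)).length ≤ spins.length := by
    calc ((spins.map g).filter (fun row => !row.isEmpty)).length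
        ≤ (spins.map g).length := List.length_filter_le _ _
      _ = spins.length := List.length_map ..
  have hsum_map : ((spins.map g).map List.length).sum ≤ (spins.map List.length).sum := by
    rw [List.map_map]
    exact List.sum_le_sum (fun r _ => hg_le r M)
  by_cases hE : ∃ row ∈ spins, row = []
  · obtain ⟨row, hrow, hre⟩ := hE
    have hmem : ([] : List Int) ∈ spins.map g := by
      refine List.mem_map.mpr ⟨row, hrow, ?_⟩
      subst hre
      simp [hgdef]
    have hlt : ((spins.map g).filter (fun row => !row.isEmpty)).length < (spins.map g).length :=
      List.length_filter_lt_length_iff_exists.mpr ⟨[], hmem, by simp⟩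
    rw [List.length_map] at hlt
    simp only [measureA, stepRemove, ← hgdef]
    omega
  · push_neg at hE
    have hMf : M ∈ spins.flatten := pymaxD_mem_flatten spins h hE
    obtain ⟨row, hrow, hMrow⟩ := List.mem_flatten.mp hMf
    have hlt : ((spins.map g).map List.length).sum < (spins.map List.length).sum := by
      rw [List.map_map]
      refine List.sum_lt_sum _ _ (fun r _ => hg_le r M) ⟨row, hrow, ?_⟩
      simp only [Function.comp_apply, hgdef]
      rw [if_pos hMrow, PySem.List.remove?_eq_some_erase _ _ hMrow, Option.getD_some,
        List.length_erase_of_mem hMrow]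
      have : 0 < row.length := List.length_pos_of_mem hMrow
      omega
    simp only [measureA, stepRemove, ← hgdef]
    omega

def loopA (spins : List (List Int)) (result : Int) : Int :=
  match spins with
  | [] => result
  | x :: xs =>
    let maxValues := (x :: xs).map pymaxD
    let maxValue := pymaxD maxValues
    loopA (stepRemove maxValue (x :: xs)) (result + maxValue)
termination_by measureA spins
decreasing_by exact step_measure_lt (x :: xs) (by simp)

def slot_machine (n : Int) (spins : List (List Int)) : Int := loopA spins 0

-- ===== PORT B =====
-- one row of B's loop: build the row counter, then fold its items into 'best' with max
def bestRow (b : PySem.Dict Int Int) (row : List Int) : PySem.Dict Int Int :=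
  let cnt := row.foldl (fun d v => d.insert v (d.getD v 0 + 1)) PySem.Dict.empty
  cnt.items.foldl (fun b p => b.insert p.1 (max (b.getD p.1 0) p.2)) b

def slot_machine_alt (n : Int) (spins : List (List Int)) : Int :=
  let best := spins.foldl bestRow PySem.Dict.empty
  best.items.foldl (fun acc p => acc + p.1 * p.2) 0

-- ===== PRECONDITION & SPEC =====
-- Pre_ excludes inputs with an empty row: there Python A's max(row) raises ValueError (no value is returned)
def Pre_slot_machine (n : Int) (spins : List (List Int)) : Prop := ∀ row ∈ spins, row ≠ []
instance (n : Int) (spins : List (List Int)) : Decidable (Pre_slot_machine n spins) := by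
  unfold Pre_slot_machine; infer_instance
def pvWitness_slot_machine : Int × List (List Int) := (0, [[1, 2], [2]])

def Spec_slot_machine (n : Int) (spins : List (List Int)) (out : Int) : Prop := out = slot_machine_alt n spins
instance (n : Int) (spins : List (List Int)) (out : Int) : Decidable (Spec_slot_machine n spins out) := by unfold Spec_slot_machine; infer_instance

-- ===== CLAIM (what is proved, stated in full; the proofs are below) =====
def Claim_equal_slot_machine : Prop := ∀ (n : Int) (spins : List (List Int)), Dom_slot_machine n spins → Pre_slot_machine n spins → Spec_slot_machine n spins (slot_machine n spins)
-- ===== LEMMAS AND PROOFS =====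

-- max per-row count of v across all rows
def cntN (spins : List (List Int)) (v : Int) : Nat := (spins.map (fun r => r.count v)).foldl max 0

-- the common mathematical value both programs compute
def specSum (spins : List (List Int)) : Int :=
  ∑ v ∈ spins.flatten.toFinset, v * (cntN spins v : Int)

theorem foldl_max_acc (l : List Nat) (a : Nat) : l.foldl max a = max a (l.foldl max 0) := by
  induction l generalizing a with
  | nil => simp
  | cons x t ih =>
    simp only [List.foldl_cons]
    rw [ih (max a x), ih (max 0 x)]
    omega

theorem cntN_cons (r : List Int) (l : List (List Int)) (v : Int) :
    cntN (r :: l) v = max (r.count v) (cntN l v) := by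
  simp only [cntN, List.map_cons, List.foldl_cons]
  rw [foldl_max_acc]
  omega

theorem mem_flatten_iff_cntN (spins : List (List Int)) (v : Int) :
    v ∈ spins.flatten ↔ cntN spins v ≠ 0 := by
  induction spins with
  | nil => simp [cntN]
  | cons r t ih =>
    rw [List.flatten_cons, List.mem_append, ih, cntN_cons, ← List.count_pos_iff]
    omega

theorem cntN_filter (l : List (List Int)) (v : Int) :
    cntN (l.filter (fun row => !row.isEmpty)) v = cntN l v := by
  induction l with
  | nil => rfl
  | cons r t ih =>
    by_cases hr : r.isEmpty
    · have hr' : r = [] := List.isEmpty_iff.mp hr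
      subst hr'
      rw [List.filter_cons_of_neg (by simp), ih, cntN_cons]
      simp
    · simp only [List.filter_cons, Bool.not_eq_eq_eq_not, Bool.not_false]
      rw [if_pos (by simpa using hr), cntN_cons, cntN_cons, ih]

theorem count_removeStep (M v : Int) (row : List Int) :
    ((if M ∈ row then (PySem.List.remove? row M).getD row else row).count v)
      = if v = M then row.count M - 1 else row.count v := by
  by_cases hM : M ∈ row
  · rw [if_pos hM, PySem.List.remove?_eq_some_erase _ _ hM, Option.getD_some, List.count_erase]
    by_cases hv : v = M
    · subst hv; simp
    · simp [hv, Ne.symm hv]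
  · rw [if_neg hM]
    by_cases hv : v = M
    · subst hv
      rw [List.count_eq_zero.mpr hM]
      simp
    · rw [if_neg hv]

theorem cntN_stepRemove (M : Int) (spins : List (List Int)) (v : Int) :
    cntN (stepRemove M spins) v = if v = M then cntN spins M - 1 else cntN spins v := by
  unfold stepRemove
  rw [cntN_filter]
  induction spins with
  | nil => simp [cntN]
  | cons r t ih =>
    rw [List.map_cons, cntN_cons, count_removeStep, ih]
    by_cases hv : v = M
    · subst hv
      simp only [eq_self_iff_true, if_true, cntN_cons]
      omega
    · simp only [if_neg hv, cntN_cons]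

theorem specSum_step (M : Int) (spins : List (List Int)) (hM : M ∈ spins.flatten) :
    specSum spins = M + specSum (stepRemove M spins) := by
  have h1 : cntN spins M ≠ 0 := (mem_flatten_iff_cntN spins M).mp hM
  have hsub : (stepRemove M spins).flatten.toFinset ⊆ spins.flatten.toFinset := by
    intro v hv
    rw [List.mem_toFinset, mem_flatten_iff_cntN, cntN_stepRemove] at hv
    rw [List.mem_toFinset, mem_flatten_iff_cntN]
    by_cases h : v = M
    · subst h; simp only [if_pos rfl] at hv; omega
    · simpa [h] using hv
  have hM' : M ∈ spins.flatten.toFinset := List.mem_toFinset.mpr hM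
  unfold specSum
  have hzero : ∀ x ∈ spins.flatten.toFinset, x ∉ (stepRemove M spins).flatten.toFinset →
      x * ((cntN (stepRemove M spins) x : Int)) = 0 := by
    intro x _ hx
    rw [List.mem_toFinset, mem_flatten_iff_cntN] at hx
    push_neg at hx
    rw [hx]
    simp
  rw [Finset.sum_subset hsub hzero]
  rw [← Finset.add_sum_erase _ _ hM', ← Finset.add_sum_erase _ _ hM']
  have herase : ∑ v ∈ spins.flatten.toFinset.erase M, v * ((cntN (stepRemove M spins) v : Int))
      = ∑ v ∈ spins.flatten.toFinset.erase M, v * ((cntN spins v : Int)) :=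
    Finset.sum_congr rfl (fun v hv => by
      rw [cntN_stepRemove, if_neg (Finset.ne_of_mem_erase hv)])
  have hMterm : (M : Int) * ((cntN (stepRemove M spins) M : Int)) = M * (cntN spins M : Int) - M := by
    rw [cntN_stepRemove, if_pos rfl, Nat.cast_sub (Nat.one_le_iff_ne_zero.mpr h1)]
    ring
  rw [herase, hMterm]
  ring

theorem specSum_nil : specSum [] = 0 := by simp [specSum]

theorem loopA_eq (N : Nat) : ∀ (spins : List (List Int)) (r : Int), measureA spins ≤ N →
    (∀ row ∈ spins, row ≠ []) → loopA spins r = r + specSum spins := by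
  induction N with
  | zero =>
    intro spins r hm _
    cases spins with
    | nil => rw [loopA, specSum_nil]; ring
    | cons x xs => simp [measureA] at hm
  | succ N ih =>
    intro spins r hm hpre
    cases spins with
    | nil => rw [loopA, specSum_nil]; ring
    | cons x xs =>
      rw [loopA]
      have hMf : pymaxD ((x :: xs).map pymaxD) ∈ (x :: xs).flatten :=
        pymaxD_mem_flatten _ (by simp) hpre
      have hm' : measureA (stepRemove (pymaxD ((x :: xs).map pymaxD)) (x :: xs)) ≤ N := by
        have := step_measure_lt (x :: xs) (by simp)
        omega
      have hpre' : ∀ row ∈ stepRemove (pymaxD ((x :: xs).map pymaxD)) (x :: xs), row ≠ [] := by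
        intro row hr
        unfold stepRemove at hr
        have := List.of_mem_filter hr
        simpa using this
      rw [ih _ _ hm' hpre', specSum_step _ _ hMf]
      ring

theorem getD_fold_pairs (ks : List Int) (f : Int → Int) :
    ∀ (b : PySem.Dict Int Int) (v : Int), ks.Nodup →
    ((ks.map (fun k => (k, f k))).foldl (fun b p => b.insert p.1 (max (b.getD p.1 0) p.2)) b).getD v 0
      = if v ∈ ks then max (b.getD v 0) (f v) else b.getD v 0 := by
  induction ks with
  | nil => intro b v _; simp
  | cons k t ih =>
    intro b v hnd
    have hk : k ∉ t := (List.nodup_cons.mp hnd).1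
    have hnd' : t.Nodup := (List.nodup_cons.mp hnd).2
    rw [List.map_cons, List.foldl_cons, ih _ _ hnd']
    by_cases hvt : v ∈ t
    · have hvk : v ≠ k := fun h => hk (h ▸ hvt)
      rw [if_pos hvt, if_pos (List.mem_cons.mpr (Or.inr hvt)), PySem.Dict.getD_insert,
        if_neg hvk]
    · by_cases hvk : v = k
      · subst hvk
        rw [if_neg hvt, if_pos (List.mem_cons_self), PySem.Dict.getD_insert, if_pos rfl]
      · rw [if_neg hvt, if_neg (by simp [hvk, hvt]), PySem.Dict.getD_insert, if_neg hvk]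

theorem getD_bestRow (b : PySem.Dict Int Int) (row : List Int) (v : Int) :
    (bestRow b row).getD v 0 = if v ∈ row then max (b.getD v 0) ((row.count v : Int)) else b.getD v 0 := by
  simp only [bestRow]
  rw [PySem.Dict.foldl_insert_getD_add_one_eq_counter, PySem.Dict.items_counter,
    getD_fold_pairs _ _ _ _ (PySem.Set.nodup_ofList row)]
  by_cases hv : v ∈ row
  · rw [if_pos ((PySem.Set.mem_ofList row v).mpr hv), if_pos hv]
  · rw [if_neg (fun h => hv ((PySem.Set.mem_ofList row v).mp h)), if_neg hv]

theorem getD_foldl_bestRow (spins : List (List Int)) : ∀ (b : PySem.Dict Int Int) (v : Int),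
    0 ≤ b.getD v 0 →
    (spins.foldl bestRow b).getD v 0 = max (b.getD v 0) ((cntN spins v : Int)) := by
  induction spins with
  | nil =>
    intro b v hb
    simp only [List.foldl_nil, cntN, List.map_nil]
    omega
  | cons r t ih =>
    intro b v hb
    have hrow : (bestRow b r).getD v 0 = max (b.getD v 0) ((r.count v : Int)) := by
      rw [getD_bestRow]
      by_cases hv : v ∈ r
      · rw [if_pos hv]
      · rw [if_neg hv, List.count_eq_zero.mpr hv]
        push_cast
        omega
    rw [List.foldl_cons, ih _ _ (by rw [hrow]; positivity), hrow, cntN_cons]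
    push_cast
    omega

theorem keys_bestRow (b : PySem.Dict Int Int) (row : List Int) :
    (bestRow b row).keys = PySem.Set.update b.keys (PySem.Set.ofList row) := by
  simp only [bestRow]
  rw [PySem.Dict.foldl_insert_getD_add_one_eq_counter, PySem.Dict.items_counter,
    PySem.Dict.keys_foldl_insert_key _ (fun p : Int × Int => p.1) (fun b p => max (b.getD p.1 0) p.2)]
  congr 1
  simp [List.map_map, Function.comp_def]

theorem mem_keys_foldl_bestRow (spins : List (List Int)) : ∀ (b : PySem.Dict Int Int) (v : Int),
    v ∈ (spins.foldl bestRow b).keys ↔ v ∈ b.keys ∨ v ∈ spins.flatten := by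
  induction spins with
  | nil => intro b v; simp
  | cons r t ih =>
    intro b v
    rw [List.foldl_cons, ih, keys_bestRow, PySem.Set.mem_update, PySem.Set.mem_ofList,
      List.flatten_cons, List.mem_append]
    tauto

theorem nodup_keys_foldl_bestRow (spins : List (List Int)) : ∀ (b : PySem.Dict Int Int),
    b.keys.Nodup → (spins.foldl bestRow b).keys.Nodup := by
  induction spins with
  | nil => intro b hb; exact hb
  | cons r t ih =>
    intro b hb
    rw [List.foldl_cons]
    refine ih _ ?_
    simp only [bestRow]
    exact PySem.Dict.nodup_keys_foldl_insert_key _ (fun p : Int × Int => p.1)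
      (fun b p => max (b.getD p.1 0) p.2) _ hb

theorem alt_eq_specSum (n : Int) (spins : List (List Int)) :
    slot_machine_alt n spins = specSum spins := by
  simp only [slot_machine_alt]
  have hnd : (spins.foldl bestRow PySem.Dict.empty).keys.Nodup :=
    nodup_keys_foldl_bestRow spins _ PySem.Dict.nodup_keys_empty
  have hgetD : ∀ v : Int, (spins.foldl bestRow PySem.Dict.empty).getD v 0 = (cntN spins v : Int) := by
    intro v
    rw [getD_foldl_bestRow spins _ v (by rw [PySem.Dict.getD_empty]), PySem.Dict.getD_empty]
    omega
  rw [PySem.List.foldl_add _ (fun p : Int × Int => p.1 * p.2) 0, zero_add]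
  have hitems : ((spins.foldl bestRow PySem.Dict.empty).items.map (fun p => p.1 * p.2))
      = ((spins.foldl bestRow PySem.Dict.empty).items.map
          (fun p => p.1 * (cntN spins p.1 : Int))) := by
    refine List.map_congr_left (fun p hp => ?_)
    have : (p.1, p.2) ∈ (spins.foldl bestRow PySem.Dict.empty).items := by simpa using hp
    rw [← hgetD p.1, PySem.Dict.getD_of_mem_items _ this hnd]
  rw [hitems]
  have hkeys : ((spins.foldl bestRow PySem.Dict.empty).items.map
        (fun p => p.1 * (cntN spins p.1 : Int)))
      = ((spins.foldl bestRow PySem.Dict.empty).keys.map (fun k => k * (cntN spins k : Int))) := by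
    simp only [PySem.Dict.keys, List.map_map]
    rfl
  rw [hkeys, ← List.sum_toFinset _ hnd]
  have hfin : (spins.foldl bestRow PySem.Dict.empty).keys.toFinset = spins.flatten.toFinset := by
    ext v
    rw [List.mem_toFinset, List.mem_toFinset, mem_keys_foldl_bestRow]
    simp [PySem.Dict.keys_empty]
  rw [hfin]
  rfl

-- ===== VERDICT (by name: the statement is the Claim_ definition above) =====
theorem slot_machine_spec : Claim_equal_slot_machine := by
  intro n spins _ hpre
  unfold Spec_slot_machine slot_machine
  rw [alt_eq_specSum, loopA_eq (measureA spins) spins 0 le_rfl hpre, zero_add]
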